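-- pv_equiv track=rewrite | github.com/Nikhilesh-B/CompetitiveProgrammingPractice | competitive programming questions/Codeforces div 3 tuesday december 5th 2023/remove_unattractive_pairs.py | min_length_after_removal
-- ===== SOURCE A (Python) =====
-- def min_length_after_removal(n, s):
--     stack = []  # Stack to keep track of characters
--     for char in s:
--         if stack and stack[-1] != char:
--             stack.pop()  # Remove the pair if adjacent characters are different
--         else:
--             stack.append(char)
--     return len(stack)
-- ===== SOURCE B (Python) =====
-- def min_length_after_removal(n, s):
--     # Stage 1: run-length encode s into maximal runs of equal characters.
--     runs = []
--     i = 0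
--     while i < len(s):
--         j = i
--         while j < len(s) and s[j] == s[i]:
--             j += 1
--         runs.append((s[i], j - i))
--         i = j
--     # Stage 2: cancel whole runs arithmetically.  The survivors always form a
--     # run (count, cand); a run of k different characters cancels min(count, k)
--     # of them at once.
--     count = 0
--     cand = ''
--     for c, k in runs:
--         if count == 0 or cand == c:
--             count += k
--             cand = c
--         elif count > k:
--             count -= k
--         else:
--             count = k - count
--             cand = c
--     return count
-- ===== Notes on version B (the rewrite author's own statement) =====
-- stated objective: alternative
-- what changed: Two staged passes instead of a per-character stack: first run-length encode s into maximal runs, then cancel whole runs arithmetically (a run of k different characters cancels min(count,k) survivors at once), exploiting that the surviving characters always form a single run.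
import Mathlib
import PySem

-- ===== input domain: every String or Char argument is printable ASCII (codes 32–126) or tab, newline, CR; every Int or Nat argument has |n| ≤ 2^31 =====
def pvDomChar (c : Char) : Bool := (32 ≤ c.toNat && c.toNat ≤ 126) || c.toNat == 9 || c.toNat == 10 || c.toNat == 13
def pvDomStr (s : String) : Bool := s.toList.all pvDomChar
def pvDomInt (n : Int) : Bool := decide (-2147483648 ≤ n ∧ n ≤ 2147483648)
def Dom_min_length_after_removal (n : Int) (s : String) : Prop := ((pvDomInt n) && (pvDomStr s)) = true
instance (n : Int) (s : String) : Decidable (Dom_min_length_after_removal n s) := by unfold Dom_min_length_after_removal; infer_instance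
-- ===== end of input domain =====

-- B replaces A's per-character stack by two staged passes: run-length encode s into
-- maximal runs, then cancel whole runs arithmetically (alternative decomposition, same cost).


-- ===== PORT A =====
-- stack top is the list head; append = push to front, stack[-1] = head, pop = tail
def pvStepA (stack : List Char) (char : Char) : List Char :=
  if stack ≠ [] ∧ stack.head! ≠ char then stack.tail else char :: stack

def min_length_after_removal (n : Int) (s : String) : Int :=
  ((s.toList.foldl pvStepA []).length : Int)

-- ===== PORT B =====
-- stage 1 of Source B: the inner while loop is takeWhile/dropWhile of equal characters
def pvRuns : List Char → List (Char × Nat)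
  | [] => []
  | c :: rest =>
      (c, ((c :: rest).takeWhile (fun x => x == c)).length) ::
        pvRuns ((c :: rest).dropWhile (fun x => x == c))
  termination_by l => l.length
  decreasing_by
    simp only [List.dropWhile_cons, beq_self_eq_true, if_true, List.length_cons]
    exact Nat.lt_succ_of_le (List.length_dropWhile_le _ _)

-- stage 2 of Source B: cancel one whole run against the surviving run (count, cand)
def pvRunStep (st : Int × Char) (r : Char × Nat) : Int × Char :=
  if st.1 = 0 ∨ st.2 = r.1 then (st.1 + (r.2 : Int), r.1)
  else if st.1 > (r.2 : Int) then (st.1 - (r.2 : Int), st.2)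
  else ((r.2 : Int) - st.1, r.1)

def min_length_after_removal_alt (n : Int) (s : String) : Int :=
  ((pvRuns s.toList).foldl pvRunStep (0, ' ')).1

-- ===== PRECONDITION & SPEC =====
def Spec_min_length_after_removal (n : Int) (s : String) (out : Int) : Prop := out = min_length_after_removal_alt n s
instance (n : Int) (s : String) (out : Int) : Decidable (Spec_min_length_after_removal n s out) := by unfold Spec_min_length_after_removal; infer_instance

-- ===== CLAIM (what is proved, stated in full; the proofs are below) =====
def Claim_equal_min_length_after_removal : Prop := ∀ (n : Int) (s : String), Dom_min_length_after_removal n s → Spec_min_length_after_removal n s (min_length_after_removal n s)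

-- ===== LEMMAS AND PROOFS =====

-- proof-side middleman: a per-character counter version of A's stack
def pvStepB (st : Int × Char) (char : Char) : Int × Char :=
  if st.1 = 0 then (1, char)
  else if st.2 = char then (st.1 + 1, st.2)
  else (st.1 - 1, st.2)

-- invariant: count = stack length, every stack element equals the candidate
theorem pv_inv (l : List Char) : ∀ (st : List Char) (cnt : Int) (cand : Char),
    cnt = (st.length : Int) → (∀ x ∈ st, x = cand) →
    (l.foldl pvStepB (cnt, cand)).1 = ((l.foldl pvStepA st).length : Int) := by
  induction l with
  | nil => intro st cnt cand h _; simpa using h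
  | cons c l ih =>
    intro st cnt cand hlen hall
    simp only [List.foldl_cons]
    cases st with
    | nil =>
      have : cnt = 0 := by simpa using hlen
      subst this
      simp only [pvStepA, pvStepB]
      norm_num
      exact ih [c] 1 c (by simp) (by simp)
    | cons a rest =>
      have ha : a = cand := hall a (by simp)
      have hne : cnt ≠ 0 := by simp at hlen; omega
      by_cases hc : cand = c
      · have : pvStepA (a :: rest) c = c :: a :: rest := by
          simp [pvStepA, ha, hc]
        rw [this]
        have : pvStepB (cnt, cand) c = (cnt + 1, cand) := by
          simp [pvStepB, hne, hc]
        rw [this]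
        refine ih _ _ _ (by simp at hlen ⊢; omega) ?_
        intro x hx
        rcases List.mem_cons.mp hx with rfl | hx
        · exact hc.symm
        · exact hall x hx
      · have : pvStepA (a :: rest) c = rest := by
          simp [pvStepA, ha, hc]
        rw [this]
        have : pvStepB (cnt, cand) c = (cnt - 1, cand) := by
          simp [pvStepB, hne, hc]
        rw [this]
        exact ih _ _ _ (by simp at hlen ⊢; omega) (fun x hx => hall x (by simp [hx]))

-- pvRuns is a run-length encoding: concatenating the runs gives back the list
theorem pvRuns_flatMap (l : List Char) :
    (pvRuns l).flatMap (fun r => List.replicate r.2 r.1) = l := by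
  induction l using pvRuns.induct with
  | case1 => simp [pvRuns]
  | case2 c rest ih =>
    rw [pvRuns]
    simp only [List.flatMap_cons]
    have htw : ((c :: rest).takeWhile (fun x => x == c)) =
        List.replicate ((c :: rest).takeWhile (fun x => x == c)).length c := by
      apply List.eq_replicate_of_mem
      intro b hb
      simpa using List.mem_takeWhile_imp hb
    rw [ih, ← htw, List.takeWhile_append_dropWhile]

-- state equivalence: equal nonnegative counts, equal candidates when nonzero
def pvRel (p q : Int × Char) : Prop := p.1 = q.1 ∧ 0 ≤ p.1 ∧ (p.1 ≠ 0 → p.2 = q.2)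

theorem pvStepB_replicate_same (k : Nat) : ∀ (m : Int) (c : Char), 0 < m →
    (List.replicate k c).foldl pvStepB (m, c) = (m + k, c) := by
  induction k with
  | zero => intro m c _; simp
  | succ k ih =>
    intro m c hm
    rw [List.replicate_succ, List.foldl_cons]
    have : pvStepB (m, c) c = (m + 1, c) := by
      simp only [pvStepB]
      rw [if_neg (by omega)]
      simp
    rw [this, ih (m + 1) c (by omega)]
    norm_num
    ring

theorem pvStepB_replicate_diff (k : Nat) : ∀ (m : Int) (cand c : Char), cand ≠ c → 0 ≤ m →
    (List.replicate k c).foldl pvStepB (m, cand) =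
      if (k : Int) ≤ m then (m - k, cand) else ((k : Int) - m, c) := by
  induction k with
  | zero =>
    intro m cand c _ hm
    simp only [List.replicate_zero, List.foldl_nil, Nat.cast_zero]
    rw [if_pos hm]
    simp
  | succ k ih =>
    intro m cand c hne hm
    rw [List.replicate_succ, List.foldl_cons]
    by_cases h0 : m = 0
    · subst h0
      have : pvStepB (0, cand) c = (1, c) := by simp [pvStepB]
      rw [this, pvStepB_replicate_same k 1 c (by omega)]
      have : ¬ ((k : Int) + 1 ≤ 0) := by omega
      simp [this]
      ring
    · have : pvStepB (m, cand) c = (m - 1, cand) := by simp [pvStepB, h0, hne]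
      rw [this, ih (m - 1) cand c hne (by omega)]
      by_cases hk : (k : Int) ≤ m - 1
      · rw [if_pos hk, if_pos (by push_cast; omega)]
        push_cast; ring_nf
      · rw [if_neg hk, if_neg (by push_cast; omega)]
        push_cast; ring_nf

-- one whole run through the counter equals one arithmetic pvRunStep, up to pvRel
theorem pvRunStep_sound (c : Char) (k : Nat) (st : Int × Char) (hst : 0 ≤ st.1) :
    pvRel (pvRunStep st (c, k)) ((List.replicate k c).foldl pvStepB st) := by
  obtain ⟨m, cand⟩ := st
  simp only at hst
  by_cases h : m = 0 ∨ cand = c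
  · have hfold : (List.replicate k c).foldl pvStepB (m, cand) = (m + k, c) ∨
        (k = 0 ∧ (List.replicate k c).foldl pvStepB (m, cand) = (m, cand)) := by
      rcases h with h0 | hc
      · subst h0
        cases k with
        | zero => right; exact ⟨rfl, by simp⟩
        | succ k =>
          left
          rw [List.replicate_succ, List.foldl_cons]
          have : pvStepB (0, cand) c = (1, c) := by simp [pvStepB]
          rw [this, pvStepB_replicate_same k 1 c (by omega)]
          norm_num
          ring
      · subst hc
        rcases lt_or_eq_of_le hst with hm | hm
        · left; exact pvStepB_replicate_same k m cand hm
        · cases k with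
          | zero => right; exact ⟨rfl, by simp⟩
          | succ k =>
            left
            rw [List.replicate_succ, List.foldl_cons]
            have : pvStepB (m, cand) cand = (1, cand) := by simp [pvStepB, hm.symm]
            rw [this, ← hm, pvStepB_replicate_same k 1 cand (by omega)]
            norm_num
            ring
    have hrs : pvRunStep (m, cand) (c, k) = (m + k, c) := by
      simp [pvRunStep, h]
    rcases hfold with hf | ⟨hk, hf⟩
    · rw [hrs, hf]; exact ⟨rfl, by positivity, fun _ => rfl⟩
    · subst hk
      rw [hrs, hf]
      refine ⟨by simp, by simpa using hst, fun hne => ?_⟩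
      rcases h with h0 | hc
      · simp [h0] at hne
      · simp [hc]
  · rw [not_or] at h
    obtain ⟨hm0, hcc⟩ := h
    rw [pvStepB_replicate_diff k m cand c hcc hst]
    by_cases hk : (k : Int) ≤ m
    · rw [if_pos hk]
      by_cases hgt : m > (k : Int)
      · have : pvRunStep (m, cand) (c, k) = (m - k, cand) := by
          simp only [pvRunStep]
          rw [if_neg (by simp [hm0, hcc]), if_pos hgt]
        rw [this]; exact ⟨rfl, by omega, fun _ => rfl⟩
      · have hmk : m = (k : Int) := by omega
        have : pvRunStep (m, cand) (c, k) = ((k : Int) - m, c) := by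
          simp only [pvRunStep]
          rw [if_neg (by simp [hm0, hcc]), if_neg hgt]
        rw [this]
        exact ⟨by omega, by omega, fun hne => by omega⟩
    · rw [if_neg hk]
      have : pvRunStep (m, cand) (c, k) = ((k : Int) - m, c) := by
        simp only [pvRunStep]
        rw [if_neg (by simp [hm0, hcc]), if_neg (by omega)]
      rw [this]; exact ⟨rfl, by omega, fun _ => rfl⟩

-- pvRunStep respects pvRel
theorem pvRunStep_congr (p q : Int × Char) (r : Char × Nat) (h : pvRel p q) :
    pvRel (pvRunStep p r) (pvRunStep q r) := by
  obtain ⟨h1, h2, h3⟩ := h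
  by_cases h0 : p.1 = 0
  · have : pvRunStep p r = (p.1 + r.2, r.1) := by simp [pvRunStep, h0]
    rw [this]
    have : pvRunStep q r = (q.1 + r.2, r.1) := by simp [pvRunStep, ← h1, h0]
    rw [this]
    exact ⟨by rw [h1], by positivity, fun _ => rfl⟩
  · have hc := h3 h0
    have heq : pvRunStep q r = pvRunStep p r := by
      simp only [pvRunStep, h1, hc]
    rw [heq]
    refine ⟨rfl, ?_, fun _ => rfl⟩
    simp only [pvRunStep]
    split_ifs <;> push_cast <;> omega

-- pvRel is transported along a whole run fold on the right
theorem pvRuns_fold (rs : List (Char × Nat)) : ∀ (p q : Int × Char), pvRel p q →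
    pvRel (rs.foldl pvRunStep p)
      ((rs.flatMap (fun r => List.replicate r.2 r.1)).foldl pvStepB q) := by
  induction rs with
  | nil => intro p q h; simpa using h
  | cons r rs ih =>
    intro p q h
    rw [List.flatMap_cons, List.foldl_append, List.foldl_cons]
    obtain ⟨c, k⟩ := r
    have hq : 0 ≤ q.1 := by
      obtain ⟨h1, h2, _⟩ := h; omega
    have step1 := pvRunStep_congr p q (c, k) h
    have step2 := pvRunStep_sound c k q hq
    refine ih _ _ ⟨?_, ?_, ?_⟩
    · rw [step1.1, step2.1]
    · exact step1.2.1
    · intro hne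
      rw [step1.2.2 hne, step2.2.2 (by rw [← step1.1]; exact hne)]

-- ===== VERDICT (by name: the statement is the Claim_ definition above) =====
theorem min_length_after_removal_spec : Claim_equal_min_length_after_removal := by
  intro n s _
  unfold Spec_min_length_after_removal min_length_after_removal min_length_after_removal_alt
  have h := pvRuns_fold (pvRuns s.toList) (0, ' ') (0, ' ')
    ⟨rfl, le_refl _, fun _ => rfl⟩
  rw [pvRuns_flatMap] at h
  rw [h.1, pv_inv s.toList [] 0 ' ' (by simp) (by simp)]
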